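-- pv_equiv track=rewrite | github.com/Brieden/Advent-of-Code-2024 | Day 01 Historian Hysteria/d_01_2.py | calculate_weighted_sum
-- ===== SOURCE A (Python) =====
-- from typing import List, Tuple
-- from collections import Counter
--
-- def calculate_weighted_sum(column_data: Tuple[List[int], List[int]]) -> int:
--     """Calculates the weighted sum of occurrences of integers in two columns."""
--     counts_left = Counter(column_data[0])
--     counts_right = Counter(column_data[1])
--
--     weighted_sum = sum(
--         counts_left[key] * counts_right[key] * key
--         for key in counts_left.keys() & counts_right.keys()
--     )
--     return weighted_sum
-- ===== SOURCE B (Python) =====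
-- from typing import List, Tuple
--
-- def calculate_weighted_sum(column_data: Tuple[List[int], List[int]]) -> int:
--     """Calculates the weighted sum of occurrences of integers in two columns."""
--     left, right = column_data
--     counts = {}
--     for y in right:
--         counts[y] = counts.get(y, 0) + 1
--     total = 0
--     for x in left:
--         total += x * counts.get(x, 0)
--     return total
-- ===== Notes on version B (the rewrite author's own statement) =====
-- stated objective: simpler
-- what changed: B drops both Counters and the key-set intersection: it builds one plain dict of right-column counts with an explicit loop, then accumulates x * counts.get(x, 0) in a running total while walking the raw left list (duplicates included), instead of summing count_left*count_right*key over the intersection of two Counters' key sets.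
import Mathlib
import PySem

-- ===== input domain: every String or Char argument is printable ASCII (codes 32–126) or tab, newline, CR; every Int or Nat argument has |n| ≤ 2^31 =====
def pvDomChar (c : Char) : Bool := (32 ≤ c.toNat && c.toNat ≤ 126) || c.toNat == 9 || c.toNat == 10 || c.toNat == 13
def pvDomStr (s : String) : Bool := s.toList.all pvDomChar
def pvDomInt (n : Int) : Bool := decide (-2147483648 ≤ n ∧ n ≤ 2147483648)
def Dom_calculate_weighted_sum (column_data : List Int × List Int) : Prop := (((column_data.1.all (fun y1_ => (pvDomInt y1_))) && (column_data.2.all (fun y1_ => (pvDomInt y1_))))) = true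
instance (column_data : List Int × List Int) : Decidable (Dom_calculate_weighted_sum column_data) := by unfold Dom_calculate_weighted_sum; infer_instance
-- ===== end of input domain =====

-- B replaces the two Counters and key-set intersection by one hand-built dict of
-- right-column counts and a running-total walk over the raw left list (simpler).

-- ===== PORT A =====
def calculate_weighted_sum (column_data : List Int × List Int) : Int :=
  let counts_left := PySem.Dict.counter column_data.1
  let counts_right := PySem.Dict.counter column_data.2
  -- 'counts_left.keys() & counts_right.keys()' is a Python set; its iteration order is
  -- unspecified, and the sum below is order-independent, so Set.inter's order is exact here.
  (PySem.Set.inter counts_left.keys counts_right.keys).foldl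
    (fun acc key => acc + counts_left.getD key 0 * counts_right.getD key 0 * key) 0

-- ===== PORT B =====
-- 'for y in right: counts[y] = counts.get(y, 0) + 1'
def pvBuildCounts (counts : PySem.Dict Int Int) : List Int → PySem.Dict Int Int
  | [] => counts
  | y :: rest => pvBuildCounts (counts.insert y (counts.getD y 0 + 1)) rest

-- 'total = 0; for x in left: total += x * counts.get(x, 0)'
def pvTally (counts : PySem.Dict Int Int) (total : Int) : List Int → Int
  | [] => total
  | x :: rest => pvTally counts (total + x * counts.getD x 0) rest

def calculate_weighted_sum_alt (column_data : List Int × List Int) : Int :=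
  pvTally (pvBuildCounts PySem.Dict.empty column_data.2) 0 column_data.1

-- ===== PRECONDITION & SPEC =====
def Spec_calculate_weighted_sum (column_data : List Int × List Int) (out : Int) : Prop := out = calculate_weighted_sum_alt column_data
instance (column_data : List Int × List Int) (out : Int) : Decidable (Spec_calculate_weighted_sum column_data out) := by unfold Spec_calculate_weighted_sum; infer_instance

-- ===== CLAIM (what is proved, stated in full; the proofs are below) =====
def Claim_equal_calculate_weighted_sum : Prop := ∀ (column_data : List Int × List Int), Dom_calculate_weighted_sum column_data → Spec_calculate_weighted_sum column_data (calculate_weighted_sum column_data)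

-- ===== LEMMAS AND PROOFS =====

-- pvBuildCounts is the dict fold 'counter'-style insert loop.
theorem pvBuildCounts_eq_foldl (d : PySem.Dict Int Int) (l : List Int) :
    pvBuildCounts d l = l.foldl (fun d y => d.insert y (d.getD y 0 + 1)) d := by
  induction l generalizing d with
  | nil => rfl
  | cons y rest ih => simp [pvBuildCounts, ih]

-- The hand-built dict looks up to the list count.
theorem pvBuildCounts_getD (l : List Int) (x : Int) :
    (pvBuildCounts PySem.Dict.empty l).getD x 0 = (l.count x : Int) := by
  rw [pvBuildCounts_eq_foldl, PySem.Dict.getD_foldl_insert_add_one]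
  simp

-- The running total accumulates the per-occurrence sum.
theorem pvTally_eq (c : PySem.Dict Int Int) (total : Int) (l : List Int) :
    pvTally c total l = total + (l.map (fun x => x * c.getD x 0)).sum := by
  induction l generalizing total with
  | nil => simp [pvTally]
  | cons x rest ih => simp [pvTally, ih]; ring

-- Summing g over a filtered list equals summing over the whole list when g vanishes off the filter.
theorem pv_sum_filter_eq (l : List Int) (p : Int → Bool) (g : Int → Int)
    (h : ∀ x, p x = false → g x = 0) :
    ((l.filter p).map g).sum = (l.map g).sum := by
  induction l with
  | nil => rfl
  | cons a t ih =>
    by_cases hp : p a = true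
    · simp [hp, ih]
    · have : p a = false := by simpa using hp
      simp [this, ih, h a this]

-- Weighted sum over distinct keys with multiplicities equals the plain sum over the list.
theorem pv_dedup_count_sum (l : List Int) (g : Int → Int) :
    ((PySem.Set.ofList l).map (fun k => (l.count k : Int) * g k)).sum = (l.map g).sum := by
  have hnd : (PySem.Set.ofList l).Nodup := by
    rw [← PySem.List.dedup_eq_ofList]; exact PySem.List.nodup_dedup l
  have h1 : ((PySem.Set.ofList l).map (fun k => (l.count k : Int) * g k)).sum
      = ∑ m ∈ (PySem.Set.ofList l).toFinset, (l.count m : Int) * g m := by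
    rw [Finset.sum_list_map_count]
    refine Finset.sum_congr rfl ?_
    intro m hm
    have hc : (PySem.Set.ofList l).count m = 1 :=
      List.count_eq_one_of_mem hnd (List.mem_toFinset.mp hm)
    rw [hc]; simp
  have h2 : (PySem.Set.ofList l).toFinset = l.toFinset := by
    ext x
    simp [List.mem_toFinset, PySem.Set.mem_ofList]
  have h3 : (l.map g).sum = ∑ m ∈ l.toFinset, (l.count m : Int) * g m := by
    rw [Finset.sum_list_map_count]
    refine Finset.sum_congr rfl ?_
    intro m _
    simp
  rw [h1, h2, h3]

theorem pv_main (l r : List Int) :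
    calculate_weighted_sum (l, r) = calculate_weighted_sum_alt (l, r) := by
  unfold calculate_weighted_sum calculate_weighted_sum_alt
  rw [pvTally_eq]
  simp only [PySem.List.foldl_add, PySem.Dict.getD_counter, PySem.Dict.keys_counter, zero_add]
  have hget : ∀ x : Int, (pvBuildCounts PySem.Dict.empty r).getD x 0 = (r.count x : Int) :=
    pvBuildCounts_getD r
  have hfilter : PySem.Set.inter (PySem.Set.ofList l) (PySem.Set.ofList r)
      = (PySem.Set.ofList l).filter (fun k => (PySem.Set.ofList r).contains k) := rfl
  rw [hfilter]
  have h0 : ∀ x : Int, ((PySem.Set.ofList r).contains x) = false →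
      ((l.count x : Int) * (r.count x : Int) * x) = 0 := by
    intro x hx
    have hxr : x ∉ r := by simpa using hx
    simp [List.count_eq_zero_of_not_mem hxr]
  rw [pv_sum_filter_eq _ _ _ h0]
  have := pv_dedup_count_sum l (fun k => (r.count k : Int) * k)
  calc ((PySem.Set.ofList l).map (fun key => (l.count key : Int) * (r.count key : Int) * key)).sum
      = ((PySem.Set.ofList l).map (fun k => (l.count k : Int) * ((r.count k : Int) * k))).sum := by
        simp only [mul_assoc]
    _ = (l.map (fun k => (r.count k : Int) * k)).sum := this
    _ = (l.map (fun x => x * (pvBuildCounts PySem.Dict.empty r).getD x 0)).sum := by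
        simp only [hget, mul_comm]

-- ===== VERDICT (by name: the statement is the Claim_ definition above) =====
theorem calculate_weighted_sum_spec : Claim_equal_calculate_weighted_sum := by
  intro cd _
  unfold Spec_calculate_weighted_sum
  obtain ⟨l, r⟩ := cd
  exact pv_main l r
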